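-- pv_equiv track=rewrite | github.com/pypi-data/pypi-mirror-148 | packages/Algorithme/Algorithme-0.1.tar.gz/Algorithme-0.1/Algorithme/algo.py | nomberFrere
-- ===== SOURCE A (Python) =====
-- def nomberFrere(nomb1: int,nomb2: int) -> bool:
--         """nomberFrere(nomberA,nomberB):founction qui vérifie si nomberA est nombreB sont  Frere(True) ou non(False)"""
--         c = 0
--         nomb1 = list(str(nomb1))
--         for i in range(len(nomb1)):
--             if nomb1[i] in str(nomb2):
--                c+=1
--         if c == len(nomb1):
--             return True
--         else:
--             return False
-- ===== SOURCE B (Python) =====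
-- def nomberFrere(nomb1: int, nomb2: int) -> bool:
--     """Sort both character sequences and check s1 against s2 with one merge-style
--     pointer scan: for each (nondecreasing) character of s1, advance the pointer in
--     sorted s2 past smaller characters and require an equal one there."""
--     s1 = sorted(str(nomb1))
--     s2 = sorted(str(nomb2))
--     i = 0
--     for c in s1:
--         while i < len(s2) and s2[i] < c:
--             i += 1
--         if i == len(s2) or s2[i] != c:
--             return False
--     return True
-- ===== Notes on version B (the rewrite author's own statement) =====
-- stated objective: alternative
-- what changed: Replaces the per-digit membership loop (each digit of str(nomb1) rescanned against str(nomb2), counted, count compared to the length) with sort-then-merge: both character lists are sorted and a single monotone pointer scan over sorted s2 certifies every character of s1, with no rescanning, no counter and no membership test.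
import Mathlib
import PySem

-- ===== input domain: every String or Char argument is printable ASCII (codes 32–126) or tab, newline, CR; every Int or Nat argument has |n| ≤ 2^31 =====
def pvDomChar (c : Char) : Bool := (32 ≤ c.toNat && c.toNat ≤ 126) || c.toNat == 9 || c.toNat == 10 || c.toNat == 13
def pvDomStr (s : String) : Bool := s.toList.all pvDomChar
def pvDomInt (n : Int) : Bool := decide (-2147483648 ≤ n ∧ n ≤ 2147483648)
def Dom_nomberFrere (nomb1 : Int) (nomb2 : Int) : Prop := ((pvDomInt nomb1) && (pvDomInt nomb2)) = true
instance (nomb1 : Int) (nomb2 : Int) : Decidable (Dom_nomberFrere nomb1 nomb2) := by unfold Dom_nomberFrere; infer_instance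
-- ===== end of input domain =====

-- B replaces A's per-digit membership loop + counter with sort-then-merge: sort both
-- character lists and verify s1 with a single monotone pointer scan over sorted s2 (alternative).

-- ===== PORT A =====
-- c = 0; nomb1 = list(str(nomb1)); for i in range(len(nomb1)): if nomb1[i] in str(nomb2): c += 1
-- 'nomb1[i] in str(nomb2)' is a one-character substring test, exactly character membership.
def nomberFrere (nomb1 : Int) (nomb2 : Int) : Bool :=
  let l1 : List Char := (PySem.Int.toStr nomb1).toList
  let s2 : List Char := (PySem.Int.toStr nomb2).toList
  let c : Int := (PySem.List.pyRange 0 (PySem.List.len l1) 1).foldl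
      (fun c i => if s2.contains (PySem.List.pyGetD l1 i ' ') then c + 1 else c) 0
  if c = PySem.List.len l1 then true else false

-- ===== PORT B =====
-- the for/while pointer loop of Source B: the pointer i into sorted s2 is represented by the
-- not-yet-passed suffix of s2 (advancing i = dropping the head); the for loop over sorted s1
-- is the structural recursion on its elements.
def pvScan : List Char → List Char → Bool
  | [], _ => true
  | _ :: _, [] => false                       -- i == len(s2): return False
  | c :: cs, d :: ds =>
      if d < c then pvScan (c :: cs) ds       -- while s2[i] < c: i += 1
      else if d = c then pvScan cs (d :: ds)  -- matched; next c, pointer unchanged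
      else false                              -- s2[i] != c: return False
termination_by s1 s2 => s1.length + s2.length

-- s1 = sorted(str(nomb1)); s2 = sorted(str(nomb2)); then the pointer scan
def nomberFrere_alt (nomb1 : Int) (nomb2 : Int) : Bool :=
  pvScan (PySem.List.sorted (PySem.Int.toStr nomb1).toList (fun x => x) false)
         (PySem.List.sorted (PySem.Int.toStr nomb2).toList (fun x => x) false)

-- ===== PRECONDITION & SPEC =====
def Spec_nomberFrere (nomb1 : Int) (nomb2 : Int) (out : Bool) : Prop := out = nomberFrere_alt nomb1 nomb2
instance (nomb1 : Int) (nomb2 : Int) (out : Bool) : Decidable (Spec_nomberFrere nomb1 nomb2 out) := by unfold Spec_nomberFrere; infer_instance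

-- ===== CLAIM =====
def Claim_equal_nomberFrere : Prop := ∀ (nomb1 : Int) (nomb2 : Int), Dom_nomberFrere nomb1 nomb2 → Spec_nomberFrere nomb1 nomb2 (nomberFrere nomb1 nomb2)

-- ===== LEMMAS AND PROOFS =====

-- A's counting loop computes countP (over any list, any starting accumulator).
theorem pvFoldlCount {α : Type} (p : α → Bool) (l : List α) (a : Int) :
    l.foldl (fun c x => if p x then c + 1 else c) a = a + (l.countP p : Int) := by
  induction l generalizing a with
  | nil => simp
  | cons x xs ih =>
    by_cases h : p x = true
    · simp [h, ih]; ring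
    · simp [h, ih]

-- the pointer scan on two nondecreasing lists decides "every element of s1 occurs in s2"
theorem pvScan_iff (s1 s2 : List Char)
    (h1 : s1.Pairwise (· ≤ ·)) (h2 : s2.Pairwise (· ≤ ·)) :
    pvScan s1 s2 = true ↔ ∀ x ∈ s1, x ∈ s2 := by
  induction s1, s2 using pvScan.induct with
  | case1 s2 => simp [pvScan]
  | case2 c cs =>
    simp only [pvScan, Bool.false_eq_true, false_iff]
    intro h
    exact absurd (h c List.mem_cons_self) List.not_mem_nil
  | case3 c cs d ds hlt ih =>
    rw [pvScan, if_pos hlt, ih h1 (List.Pairwise.sublist (List.sublist_cons_self d ds) h2)]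
    constructor
    · intro h x hx
      exact List.mem_cons_of_mem d (h x hx)
    · intro h x hx
      rcases List.mem_cons.mp (h x hx) with hxd | hxds
      · exfalso
        have hcx : c ≤ x := by
          rcases List.mem_cons.mp hx with rfl | hxcs
          · exact le_refl x
          · exact (List.pairwise_cons.mp h1).1 x hxcs
        subst hxd
        exact absurd (lt_of_lt_of_le hlt hcx) (lt_irrefl x)
      · exact hxds
  | case4 cs d ds hlt ih =>
    rw [pvScan, if_neg hlt, if_pos rfl,
        ih (List.Pairwise.sublist (List.sublist_cons_self d cs) h1) h2]
    constructor
    · intro h x hx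
      rcases List.mem_cons.mp hx with rfl | hxcs
      · exact List.mem_cons_self
      · exact h x hxcs
    · intro h x hx
      exact h x (List.mem_cons_of_mem _ hx)
  | case5 c cs d ds hlt hne =>
    rw [pvScan, if_neg hlt, if_neg hne]
    simp only [Bool.false_eq_true, false_iff]
    intro hall
    have hc := hall c List.mem_cons_self
    rcases List.mem_cons.mp hc with rfl | hcds
    · exact hne rfl
    · have hdc : d ≤ c := (List.pairwise_cons.mp h2).1 c hcds
      exact hlt (lt_of_le_of_ne hdc hne)

theorem nomberFrere_spec : Claim_equal_nomberFrere := by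
  intro n1 n2 _
  unfold Spec_nomberFrere nomberFrere nomberFrere_alt
  simp only []
  rw [PySem.List.foldl_pyRange_pyGetD (PySem.Int.toStr n1).toList ' '
      (fun c x => if (PySem.Int.toStr n2).toList.contains x = true then c + 1 else c) 0 le_rfl]
  simp only [Int.toNat_zero, List.drop_zero, pvFoldlCount, zero_add]
  set l1 := (PySem.Int.toStr n1).toList
  set l2 := (PySem.Int.toStr n2).toList
  rw [← Bool.coe_iff_coe]
  have hA : ((if (l1.countP l2.contains : Int) = PySem.List.len l1 then true else false) = true)
      ↔ ∀ x ∈ l1, x ∈ l2 := by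
    simp [PySem.List.len, List.countP_eq_length]
  have hB : (pvScan (PySem.List.sorted l1 (fun x => x) false)
                    (PySem.List.sorted l2 (fun x => x) false) = true)
      ↔ ∀ x ∈ l1, x ∈ l2 := by
    rw [pvScan_iff _ _ (PySem.List.sorted_pairwise l1 (fun x => x))
        (PySem.List.sorted_pairwise l2 (fun x => x))]
    simp [PySem.List.mem_sorted]
  exact hA.trans hB.symm
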